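-- pv_equiv track=rewrite | github.com/F0d0s/PVA | ULOHY/ULOHA6/main.py | optimize_shopping_list
-- ===== SOURCE A (Python) =====
-- def find_item_in_shelves(shelves, item):
--     for shelf_id, items in shelves.items():
--         for shelf_item in items:
--             if item.lower() == shelf_item.lower():
--                 return (shelf_id, shelf_item)
--     for shelf_id, items in shelves.items():
--         for shelf_item in items:
--             if item.lower() in shelf_item.lower():
--                 return (shelf_id, shelf_item)
--     return None
--
-- def optimize_shopping_list(shelves, shopping_list):
--     found_items = []
--     not_found_items = []
--
--     for item in shopping_list:
--         found_item = find_item_in_shelves(shelves, item)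
--         if found_item:
--             found_items.append((item, *found_item))
--         else:
--             not_found_items.append((item, "N/A", ""))
--
--     found_items.sort(key=lambda x: (x[1], shopping_list.index(x[0])))
--
--     optimized_list = found_items + not_found_items
--     return optimized_list
-- ===== SOURCE B (Python) =====
-- def optimize_shopping_list(shelves, shopping_list):
--     # Flatten the shelves once into (shelf_id, shelf_item, lowered) triples.
--     pairs = [(sid, it, it.lower())
--              for sid, items in shelves.items() for it in items]
--
--     # ONE shelf-major pass over all shelf entries, recording for every shopping
--     # item its first exact hit and its first substring hit, never overwriting.
--     exact, sub = {}, {}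
--     for sid, it, lo in pairs:
--         for item in shopping_list:
--             low = item.lower()
--             if item not in exact and low == lo:
--                 exact[item] = (sid, it)
--             if item not in sub and low in lo:
--                 sub[item] = (sid, it)
--
--     found, not_found = [], []
--     for item in shopping_list:
--         hit = exact.get(item, sub.get(item))
--         if hit is None:
--             not_found.append((item, "N/A", ""))
--         else:
--             found.append((item, hit[0], hit[1]))
--
--     pos = {}
--     for i, item in enumerate(shopping_list):
--         if item not in pos:
--             pos[item] = i
--     found.sort(key=lambda t: (t[1], pos[t[0]]))
--     return found + not_found
-- ===== Notes on version B (the rewrite author's own statement) =====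
-- stated objective: alternative
-- what changed: The loop nesting is inverted: instead of scanning the shelves twice per shopping item with early return, B flattens the shelves once and makes a single shelf-major pass that fills first-exact and first-substring dictionaries for all shopping items simultaneously (never overwriting), then resolves each item by dict lookup; the sort key's repeated shopping_list.index calls are replaced by a first-occurrence dict.
import Mathlib
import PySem

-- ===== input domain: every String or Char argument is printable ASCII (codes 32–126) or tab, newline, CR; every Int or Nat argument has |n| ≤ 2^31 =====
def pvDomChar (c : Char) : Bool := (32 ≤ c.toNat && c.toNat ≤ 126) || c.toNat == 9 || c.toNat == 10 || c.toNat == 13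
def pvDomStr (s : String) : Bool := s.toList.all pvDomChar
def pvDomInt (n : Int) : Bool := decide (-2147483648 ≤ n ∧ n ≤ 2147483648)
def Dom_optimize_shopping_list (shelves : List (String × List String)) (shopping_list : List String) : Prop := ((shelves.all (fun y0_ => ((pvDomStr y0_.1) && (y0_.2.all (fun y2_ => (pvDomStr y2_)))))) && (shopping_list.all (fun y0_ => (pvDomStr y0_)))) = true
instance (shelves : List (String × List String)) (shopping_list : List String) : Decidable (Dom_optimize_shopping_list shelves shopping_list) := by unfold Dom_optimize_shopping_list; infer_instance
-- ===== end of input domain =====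

-- B inverts the loop nesting: one shelf-major pass over the flattened shelves fills first-exact and
-- first-substring dictionaries for all shopping items at once (never overwriting), instead of A's two
-- early-return scans of the shelves per item (objective: alternative).

-- ===== PORT A =====
-- first loop of find_item_in_shelves: exact (case-insensitive) match, early return
def pvFindExactIn (item sid : String) : List String → Option (String × String)
  | [] => none
  | si :: rest =>
    if PySem.Str.lower item == PySem.Str.lower si then some (sid, si)
    else pvFindExactIn item sid rest

def pvFindExact (item : String) : List (String × List String) → Option (String × String)
  | [] => none
  | (sid, its) :: rest =>
    match pvFindExactIn item sid its with
    | some r => some r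
    | none => pvFindExact item rest

-- second loop: substring (case-insensitive) match, early return
def pvFindSubIn (item sid : String) : List String → Option (String × String)
  | [] => none
  | si :: rest =>
    if PySem.Str.isIn (PySem.Str.lower item) (PySem.Str.lower si) then some (sid, si)
    else pvFindSubIn item sid rest

def pvFindSub (item : String) : List (String × List String) → Option (String × String)
  | [] => none
  | (sid, its) :: rest =>
    match pvFindSubIn item sid its with
    | some r => some r
    | none => pvFindSub item rest

def find_item_in_shelves (shelves : PySem.Dict String (List String)) (item : String) : Option (String × String) :=
  match pvFindExact item shelves.items with
  | some r => some r
  | none => pvFindSub item shelves.items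

def optimize_shopping_list (shelves : List (String × List String)) (shopping_list : List String) : List (String × String × String) :=
  let sh := PySem.Dict.ofList shelves   -- the Python argument is a dict built from these pairs
  let acc := shopping_list.foldl
    (fun (p : List (String × String × String) × List (String × String × String)) item =>
      match find_item_in_shelves sh item with
      | some (sid, si) => (p.1 ++ [(item, sid, si)], p.2)
      | none => (p.1, p.2 ++ [(item, "N/A", "")]))
    ([], [])
  -- shopping_list.index(x[0]) always succeeds (x[0] comes from shopping_list): getD 0 is exact here
  PySem.List.sorted2 acc.1 (fun x => x.2.1)
    (fun x => (PySem.List.index? shopping_list x.1).getD 0) ++ acc.2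

-- ===== PORT B =====
-- pairs = [(sid, it, it.lower()) for sid, items in shelves.items() for it in items]
def pvPairs (L : List (String × List String)) : List (String × String × String) :=
  L.flatMap (fun p => p.2.map (fun it => (p.1, it, PySem.Str.lower it)))

-- the two independent no-overwrite updates of the inner loop, for one shopping item
def pvMark (sid it lo : String)
    (st : PySem.Dict String (String × String) × PySem.Dict String (String × String))
    (item : String) :
    PySem.Dict String (String × String) × PySem.Dict String (String × String) :=
  let low := PySem.Str.lower item
  let e := if !st.1.contains item && (low == lo) then st.1.insert item (sid, it) else st.1
  let s := if !st.2.contains item && PySem.Str.isIn low lo then st.2.insert item (sid, it) else st.2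
  (e, s)

-- pos: if item not in pos: pos[item] = i
def pvBuildPos : List String → Nat → PySem.Dict String Nat → PySem.Dict String Nat
  | [], _, d => d
  | x :: rest, i, d => pvBuildPos rest (i + 1) (if !d.contains x then d.insert x i else d)

def optimize_shopping_list_alt (shelves : List (String × List String)) (shopping_list : List String) : List (String × String × String) :=
  let pairs := pvPairs (PySem.Dict.ofList shelves).items
  let st := pairs.foldl
    (fun st p => shopping_list.foldl (pvMark p.1 p.2.1 p.2.2) st)
    (PySem.Dict.empty, PySem.Dict.empty)
  let acc := shopping_list.foldl
    (fun (p : List (String × String × String) × List (String × String × String)) item =>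
      match (st.1.get? item).or (st.2.get? item) with   -- exact.get(item, sub.get(item))
      | some (sid, si) => (p.1 ++ [(item, sid, si)], p.2)
      | none => (p.1, p.2 ++ [(item, "N/A", "")]))
    ([], [])
  let pos := pvBuildPos shopping_list 0 PySem.Dict.empty
  -- pos[t[0]] always hits (t[0] comes from shopping_list): getD 0 is exact here
  PySem.List.sorted2 acc.1 (fun t => t.2.1) (fun t => pos.getD t.1 0) ++ acc.2

-- ===== PRECONDITION & SPEC =====
def Spec_optimize_shopping_list (shelves : List (String × List String)) (shopping_list : List String) (out : List (String × String × String)) : Prop := out = optimize_shopping_list_alt shelves shopping_list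
instance (shelves : List (String × List String)) (shopping_list : List String) (out : List (String × String × String)) : Decidable (Spec_optimize_shopping_list shelves shopping_list out) := by unfold Spec_optimize_shopping_list; infer_instance

-- ===== CLAIM (what is proved, stated in full; the proofs are below) =====
def Claim_equal_optimize_shopping_list : Prop := ∀ (shelves : List (String × List String)) (shopping_list : List String), Dom_optimize_shopping_list shelves shopping_list → Spec_optimize_shopping_list shelves shopping_list (optimize_shopping_list shelves shopping_list)

-- ===== LEMMAS AND PROOFS =====

-- the evolutions of the two dicts are independent
def pvStepE (sid it lo : String) (d : PySem.Dict String (String × String)) (item : String) :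
    PySem.Dict String (String × String) :=
  if !d.contains item && (PySem.Str.lower item == lo) then d.insert item (sid, it) else d

def pvStepS (sid it lo : String) (d : PySem.Dict String (String × String)) (item : String) :
    PySem.Dict String (String × String) :=
  if !d.contains item && PySem.Str.isIn (PySem.Str.lower item) lo then d.insert item (sid, it) else d

theorem pvMark_split (sid it lo : String) (l : List String)
    (e s : PySem.Dict String (String × String)) :
    l.foldl (pvMark sid it lo) (e, s)
      = (l.foldl (pvStepE sid it lo) e, l.foldl (pvStepS sid it lo) s) := by
  induction l generalizing e s with
  | nil => rfl
  | cons x rest ih => simp only [List.foldl_cons, pvMark, pvStepE, pvStepS, ih]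

theorem get?_some_of_contains {κ ν : Type} [BEq κ] [LawfulBEq κ] (d : PySem.Dict κ ν) (k : κ)
    (h : d.contains k = true) : ∃ y, d.get? k = some y := by
  rw [PySem.Dict.contains_eq_isSome_get?] at h
  cases hg : d.get? k
  · rw [hg] at h; simp at h
  · exact ⟨_, rfl⟩

theorem get?_none_of_not_contains {κ ν : Type} [BEq κ] [LawfulBEq κ] (d : PySem.Dict κ ν) (k : κ)
    (h : d.contains k = false) : d.get? k = none := by
  rw [PySem.Dict.contains_eq_isSome_get?] at h
  cases hg : d.get? k
  · rfl
  · rw [hg] at h; simp at h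

theorem foldl_stepE_get? (sid it lo : String) (l : List String)
    (d : PySem.Dict String (String × String)) (v : String) :
    (l.foldl (pvStepE sid it lo) d).get? v =
      if v ∈ l ∧ (PySem.Str.lower v == lo) = true
      then (d.get? v).or (some (sid, it)) else d.get? v := by
  induction l generalizing d with
  | nil => simp
  | cons x rest ih =>
    simp only [List.foldl_cons, ih, pvStepE]
    by_cases hvx : v = x
    · subst hvx
      by_cases hcond : (PySem.Str.lower v == lo) = true
      · by_cases hc : d.contains v = true
        · obtain ⟨y, hy⟩ := get?_some_of_contains d v hc
          simp only [hc, Bool.not_true, Bool.false_and, Bool.false_eq_true, if_false]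
          by_cases hm : v ∈ rest <;> simp [hm, hcond, hy]
        · have hc' : d.contains v = false := by simp_all
          have hnone := get?_none_of_not_contains d v hc'
          have hget : (d.insert v (sid, it)).get? v = some (sid, it) :=
            PySem.Dict.get?_insert_self d v (sid, it)
          simp only [hc', Bool.not_false, Bool.true_and, hcond, if_true]
          by_cases hm : v ∈ rest <;> simp [hm, hcond, hnone, hget]
      · simp only [hcond, Bool.and_false, Bool.false_eq_true, if_false]
        by_cases hm : v ∈ rest <;> simp [hm, hcond]
    · have hstep : (pvStepE sid it lo d x).get? v = d.get? v := by
        unfold pvStepE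
        split
        · exact PySem.Dict.get?_insert_of_ne d (sid, it) hvx
        · rfl
      rw [show (if !d.contains x && (PySem.Str.lower x == lo) then d.insert x (sid, it) else d)
            = pvStepE sid it lo d x from rfl]
      rw [hstep]
      simp [List.mem_cons, hvx]

theorem foldl_stepS_get? (sid it lo : String) (l : List String)
    (d : PySem.Dict String (String × String)) (v : String) :
    (l.foldl (pvStepS sid it lo) d).get? v =
      if v ∈ l ∧ PySem.Str.isIn (PySem.Str.lower v) lo = true
      then (d.get? v).or (some (sid, it)) else d.get? v := by
  induction l generalizing d with
  | nil => simp
  | cons x rest ih =>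
    simp only [List.foldl_cons, ih, pvStepS]
    by_cases hvx : v = x
    · subst hvx
      by_cases hcond : PySem.Str.isIn (PySem.Str.lower v) lo = true
      · by_cases hc : d.contains v = true
        · obtain ⟨y, hy⟩ := get?_some_of_contains d v hc
          simp only [hc, Bool.not_true, Bool.false_and, Bool.false_eq_true, if_false]
          by_cases hm : v ∈ rest <;> simp [hm, hcond, hy]
        · have hc' : d.contains v = false := by simp_all
          have hnone := get?_none_of_not_contains d v hc'
          have hget : (d.insert v (sid, it)).get? v = some (sid, it) :=
            PySem.Dict.get?_insert_self d v (sid, it)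
          simp only [hc', Bool.not_false, Bool.true_and, hcond, if_true]
          by_cases hm : v ∈ rest <;> simp [hm, hcond, hnone, hget]
      · simp only [hcond, Bool.and_false, Bool.false_eq_true, if_false]
        by_cases hm : v ∈ rest <;> simp [hm, hcond]
    · have hstep : (pvStepS sid it lo d x).get? v = d.get? v := by
        unfold pvStepS
        split
        · exact PySem.Dict.get?_insert_of_ne d (sid, it) hvx
        · rfl
      rw [show (if !d.contains x && PySem.Str.isIn (PySem.Str.lower x) lo then d.insert x (sid, it) else d)
            = pvStepS sid it lo d x from rfl]
      rw [hstep]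
      simp [List.mem_cons, hvx]

-- first match of each kind over the flattened pair list
def pvFirstE (low : String) : List (String × String × String) → Option (String × String)
  | [] => none
  | (sid, it, lo) :: rest => if low == lo then some (sid, it) else pvFirstE low rest

def pvFirstS (low : String) : List (String × String × String) → Option (String × String)
  | [] => none
  | (sid, it, lo) :: rest => if PySem.Str.isIn low lo then some (sid, it) else pvFirstS low rest

theorem foldl_pairs_get? (P : List (String × String × String)) (l : List String)
    (e s : PySem.Dict String (String × String)) (v : String) (hv : v ∈ l) :
    ((P.foldl (fun st p => l.foldl (pvMark p.1 p.2.1 p.2.2) st) (e, s)).1.get? v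
        = (e.get? v).or (pvFirstE (PySem.Str.lower v) P))
    ∧ ((P.foldl (fun st p => l.foldl (pvMark p.1 p.2.1 p.2.2) st) (e, s)).2.get? v
        = (s.get? v).or (pvFirstS (PySem.Str.lower v) P)) := by
  induction P generalizing e s with
  | nil => simp [pvFirstE, pvFirstS]
  | cons p rest ih =>
    obtain ⟨sid, it, lo⟩ := p
    simp only [List.foldl_cons, pvMark_split]
    obtain ⟨ih1, ih2⟩ := ih (l.foldl (pvStepE sid it lo) e) (l.foldl (pvStepS sid it lo) s)
    constructor
    · rw [ih1, foldl_stepE_get?, pvFirstE]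
      by_cases hcond : (PySem.Str.lower v == lo) = true
      · simp only [hv, hcond, true_and, and_true, if_true, if_pos]
        cases e.get? v <;> simp
      · simp [hcond]
    · rw [ih2, foldl_stepS_get?, pvFirstS]
      by_cases hcond : PySem.Str.isIn (PySem.Str.lower v) lo = true
      · rw [if_pos ⟨hv, hcond⟩, if_pos hcond]
        cases s.get? v <;> simp
      · rw [if_neg (fun h => hcond h.2), if_neg hcond]

-- the flattened first-matches are A's nested early-return scans
theorem pvFirstE_append_map (item sid : String) (its : List String)
    (Q : List (String × String × String)) :
    pvFirstE (PySem.Str.lower item) ((its.map (fun it => (sid, it, PySem.Str.lower it))) ++ Q)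
      = (pvFindExactIn item sid its).or (pvFirstE (PySem.Str.lower item) Q) := by
  induction its with
  | nil => simp [pvFindExactIn]
  | cons si rest ih =>
    simp only [List.map_cons, List.cons_append, pvFirstE, pvFindExactIn]
    by_cases h : (PySem.Str.lower item == PySem.Str.lower si) = true
    · simp [h]
    · simp [h, ih]

theorem pvFirstS_append_map (item sid : String) (its : List String)
    (Q : List (String × String × String)) :
    pvFirstS (PySem.Str.lower item) ((its.map (fun it => (sid, it, PySem.Str.lower it))) ++ Q)
      = (pvFindSubIn item sid its).or (pvFirstS (PySem.Str.lower item) Q) := by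
  induction its with
  | nil => simp [pvFindSubIn]
  | cons si rest ih =>
    simp only [List.map_cons, List.cons_append, pvFirstS, pvFindSubIn]
    by_cases h : PySem.Str.isIn (PySem.Str.lower item) (PySem.Str.lower si) = true
    · rw [if_pos h, if_pos h]
      simp
    · rw [if_neg h, if_neg h]
      exact ih

theorem pvFirstE_pairs (item : String) (L : List (String × List String)) :
    pvFirstE (PySem.Str.lower item) (pvPairs L) = pvFindExact item L := by
  induction L with
  | nil => simp [pvPairs, pvFirstE, pvFindExact]
  | cons p rest ih =>
    obtain ⟨sid, its⟩ := p
    simp only [pvPairs, List.flatMap_cons] at *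
    rw [pvFirstE_append_map, ih, pvFindExact]
    cases pvFindExactIn item sid its <;> simp

theorem pvFirstS_pairs (item : String) (L : List (String × List String)) :
    pvFirstS (PySem.Str.lower item) (pvPairs L) = pvFindSub item L := by
  induction L with
  | nil => simp [pvPairs, pvFirstS, pvFindSub]
  | cons p rest ih =>
    obtain ⟨sid, its⟩ := p
    simp only [pvPairs, List.flatMap_cons] at *
    rw [pvFirstS_append_map, ih, pvFindSub]
    cases pvFindSubIn item sid its <;> simp

-- B's dict lookups resolve to A's find, for items of the shopping list
theorem pvHit_eq (shelves : List (String × List String)) (shopping_list : List String)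
    (item : String) (hv : item ∈ shopping_list) :
    ((((pvPairs (PySem.Dict.ofList shelves).items).foldl
        (fun st p => shopping_list.foldl (pvMark p.1 p.2.1 p.2.2) st)
        (PySem.Dict.empty, PySem.Dict.empty)).1.get? item).or
      (((pvPairs (PySem.Dict.ofList shelves).items).foldl
        (fun st p => shopping_list.foldl (pvMark p.1 p.2.1 p.2.2) st)
        (PySem.Dict.empty, PySem.Dict.empty)).2.get? item))
      = find_item_in_shelves (PySem.Dict.ofList shelves) item := by
  obtain ⟨h1, h2⟩ := foldl_pairs_get? (pvPairs (PySem.Dict.ofList shelves).items)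
    shopping_list PySem.Dict.empty PySem.Dict.empty item hv
  simp only [h1, h2, PySem.Dict.get?_empty, Option.none_or,
    pvFirstE_pairs, pvFirstS_pairs, find_item_in_shelves]
  cases pvFindExact item (PySem.Dict.ofList shelves).items <;> simp

-- the first-occurrence-position dict equals the repeated list.index calls
theorem pvBuildPos_getD (l : List String) (i : Nat) (d : PySem.Dict String Nat) (v : String) :
    (pvBuildPos l i d).getD v 0 =
      if d.contains v then d.getD v 0
      else match PySem.List.index? l v with
           | some k => i + k
           | none => 0 := by
  induction l generalizing i d with
  | nil =>
    by_cases h : d.contains v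
    · simp [pvBuildPos, h]
    · simp only [pvBuildPos, h, Bool.false_eq_true, if_false, PySem.List.index?]
      exact PySem.Dict.getD_of_not_contains d 0 (by simp_all)
  | cons x rest ih =>
    simp only [pvBuildPos]
    rw [ih]
    by_cases hv : v = x
    · subst hv
      rw [PySem.List.index?_cons_self]
      by_cases hc : d.contains v
      · simp [hc]
      · have hc' : d.contains v = false := by simp_all
        simp only [hc', Bool.not_false, if_true, Bool.false_eq_true, if_false]
        rw [PySem.Dict.contains_insert_self d v i]
        simp [hc', PySem.Dict.getD_insert_self]
    · rw [PySem.List.index?_cons_of_ne _ (fun h => hv h.symm)]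
      by_cases hc : d.contains x
      · simp only [hc, Bool.not_true, Bool.false_eq_true, if_false]
        by_cases hdv : d.contains v
        · simp [hdv]
        · simp only [hdv, Bool.false_eq_true, if_false]
          cases PySem.List.index? rest v <;> simp <;> omega
      · have hc' : d.contains x = false := by simp_all
        simp only [hc', Bool.not_false, if_true]
        have h1 : (d.insert x i).contains v = d.contains v := by
          rw [PySem.Dict.contains_insert]; simp [hv]
        have h2 : (d.insert x i).getD v 0 = d.getD v 0 :=
          PySem.Dict.getD_insert_of_ne d i 0 hv
        rw [h1, h2]
        by_cases hdv : d.contains v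
        · simp [hdv]
        · simp only [hdv, Bool.false_eq_true, if_false]
          cases PySem.List.index? rest v <;> simp <;> omega

theorem pvFirstPos_eq (shopping_list : List String) (v : String) :
    (pvBuildPos shopping_list 0 PySem.Dict.empty).getD v 0
      = (PySem.List.index? shopping_list v).getD 0 := by
  rw [pvBuildPos_getD]
  simp only [PySem.Dict.contains_empty, if_false, Bool.false_eq_true]
  cases PySem.List.index? shopping_list v <;> simp

-- ===== VERDICT (by name: the statement is the Claim_ definition above) =====
theorem optimize_shopping_list_spec : Claim_equal_optimize_shopping_list := by
  intro shelves shopping_list _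
  unfold Spec_optimize_shopping_list
  unfold optimize_shopping_list optimize_shopping_list_alt
  dsimp only
  have hacc : shopping_list.foldl
      (fun (p : List (String × String × String) × List (String × String × String)) item =>
        match find_item_in_shelves (PySem.Dict.ofList shelves) item with
        | some (sid, si) => (p.1 ++ [(item, sid, si)], p.2)
        | none => (p.1, p.2 ++ [(item, "N/A", "")])) ([], [])
      = shopping_list.foldl
      (fun (p : List (String × String × String) × List (String × String × String)) item =>
        match ((((pvPairs (PySem.Dict.ofList shelves).items).foldl
            (fun st p => shopping_list.foldl (pvMark p.1 p.2.1 p.2.2) st)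
            (PySem.Dict.empty, PySem.Dict.empty)).1.get? item).or
          (((pvPairs (PySem.Dict.ofList shelves).items).foldl
            (fun st p => shopping_list.foldl (pvMark p.1 p.2.1 p.2.2) st)
            (PySem.Dict.empty, PySem.Dict.empty)).2.get? item)) with
        | some (sid, si) => (p.1 ++ [(item, sid, si)], p.2)
        | none => (p.1, p.2 ++ [(item, "N/A", "")])) ([], []) := by
    apply PySem.List.foldl_congr_mem
    intro acc x hx
    rw [pvHit_eq shelves shopping_list x hx]
  have hkey : (fun (t : String × String × String) =>
        (pvBuildPos shopping_list 0 PySem.Dict.empty).getD t.1 0)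
      = (fun (t : String × String × String) =>
        (PySem.List.index? shopping_list t.1).getD 0) := by
    funext t
    exact pvFirstPos_eq shopping_list t.1
  rw [← hacc, hkey]
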